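-- pv_equiv track=rewrite | github.com/cxzlkjhgfdsa/TIL_Algorithm | 프로그래머스/2/42586. 기능개발/기능개발.py | solution
-- ===== SOURCE A (Python) =====
-- from math import ceil
--
-- def solution(progresses, speeds):
--     answer = []
--
--     times = []
--
--     for i in range(len(speeds)):
--         work = 100 - progresses[i]
--
--         times.append(ceil(work/speeds[i]))
--
--     while(len(times) > 0):
--         count = count_release(times)
--         answer.append(count)
--
--     return answer
--
-- def count_release(times):
--     count = 1
--
--     cur = times.pop(0)
--
--     while(len(times)>0):
--         if times[0] > cur:
--             break
--         times.pop(0)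
--         count+=1
--     return count
-- ===== SOURCE B (Python) =====
-- def solution(progresses, speeds):
--     # exact integer ceiling division (matches ceil(work/speed) for |values| <= 2**31),
--     # then ONE forward pass grouping instead of repeated pop(0) peeling
--     times = [-((p - 100) // s) for p, s in zip(progresses, speeds)]
--     if not times:
--         return []
--     answer = []
--     leader, count = times[0], 1
--     for t in times[1:]:
--         if t <= leader:
--             count += 1
--         else:
--             answer.append(count)
--             leader, count = t, 1
--     answer.append(count)
--     return answer
-- ===== Notes on version B (the rewrite author's own statement) =====
-- stated objective: faster
-- what changed: Replaced the nested while-loops with repeated pop(0) group-peeling by a single forward scan over the precomputed release times that counts each group against its leading time, using integer ceiling division instead of float ceil.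
import Mathlib
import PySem

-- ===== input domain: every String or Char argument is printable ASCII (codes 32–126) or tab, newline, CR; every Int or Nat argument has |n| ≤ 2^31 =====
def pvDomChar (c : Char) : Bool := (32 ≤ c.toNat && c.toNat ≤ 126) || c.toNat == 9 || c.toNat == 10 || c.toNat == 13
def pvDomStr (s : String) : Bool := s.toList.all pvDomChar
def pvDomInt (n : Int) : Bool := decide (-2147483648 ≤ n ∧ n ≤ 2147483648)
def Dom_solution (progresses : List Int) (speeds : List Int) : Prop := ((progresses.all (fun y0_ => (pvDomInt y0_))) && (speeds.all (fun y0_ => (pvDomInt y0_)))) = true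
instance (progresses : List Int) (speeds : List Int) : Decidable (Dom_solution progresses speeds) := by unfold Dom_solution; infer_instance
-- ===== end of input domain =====

-- B replaces A's nested pop(0) group-peeling by one forward scan over the release times (faster in a timing run).

-- ===== PORT A =====
-- inner while of count_release: pops heads ≤ cur, counting them
def crLoop (cur : Int) (count : Int) : List Int → Int × List Int
  | [] => (count, [])
  | t :: ts => if t > cur then (count, t :: ts) else crLoop cur (count + 1) ts

-- count_release(times): returns (count, remaining times); the [] case is unreachable (only called with len > 0)
def count_release : List Int → Int × List Int
  | [] => (1, [])
  | c :: rest => crLoop c 1 rest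

lemma crLoop_snd_length_le (cur count : Int) (ts : List Int) :
    (crLoop cur count ts).2.length ≤ ts.length := by
  induction ts generalizing count with
  | nil => simp [crLoop]
  | cons t ts ih =>
    simp only [crLoop]
    split
    · simp
    · exact (ih _).trans (Nat.le_succ _)

-- the outer while(len(times) > 0) loop of A
def solLoop (answer : List Int) (times : List Int) : List Int :=
  match times with
  | [] => answer
  | c :: rest => solLoop (answer ++ [(count_release (c :: rest)).1]) (count_release (c :: rest)).2
termination_by times.length
decreasing_by
  simpa [count_release] using Nat.lt_succ_of_le (crLoop_snd_length_le c 1 rest)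

-- ceil(work/speeds[i]) : Python computes float ceil; on Dom (|ints| ≤ 2^31 ≪ 2^53) this equals
-- exact integer ceiling division -((-work) // s), which is what we port (exact on the stated domain).
-- pyGetD's default 0 is reached only outside Pre_solution (where Python raises IndexError).
def solution (progresses : List Int) (speeds : List Int) : List Int :=
  let times := (List.range speeds.length).map (fun (i : Nat) =>
    -(PySem.Int.floordiv (-(100 - PySem.List.pyGetD progresses ((i : Nat) : Int) 0)) (PySem.List.pyGetD speeds ((i : Nat) : Int) 0)))
  solLoop [] times

-- ===== PORT B =====
-- one forward pass: count against the current leader, emit the count when a strictly larger time appears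
def altScan (leader : Int) (count : Int) : List Int → List Int
  | [] => [count]
  | t :: ts => if t ≤ leader then altScan leader (count + 1) ts else count :: altScan t 1 ts

def solution_alt (progresses : List Int) (speeds : List Int) : List Int :=
  let times := (progresses.zip speeds).map (fun ps => -(PySem.Int.floordiv (ps.1 - 100) ps.2))
  match times with
  | [] => []
  | t :: ts => altScan t 1 ts

-- ===== PRECONDITION & SPEC =====
-- Pre_ excludes exactly the inputs where A raises: IndexError (fewer progresses than speeds)
-- and ZeroDivisionError (a zero speed).
def Pre_solution (progresses : List Int) (speeds : List Int) : Prop :=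
  speeds.length ≤ progresses.length ∧ ∀ x ∈ speeds, x ≠ 0
instance (progresses : List Int) (speeds : List Int) : Decidable (Pre_solution progresses speeds) := by
  unfold Pre_solution; infer_instance

def pvWitness_solution : List Int × List Int := ([93, 30, 55], [1, 30, 5])

def Spec_solution (progresses : List Int) (speeds : List Int) (out : List Int) : Prop := out = solution_alt progresses speeds
instance (progresses : List Int) (speeds : List Int) (out : List Int) : Decidable (Spec_solution progresses speeds out) := by unfold Spec_solution; infer_instance

-- ===== CLAIM (what is proved, stated in full; the proofs are below) =====
def Claim_equal_solution : Prop := ∀ (progresses : List Int) (speeds : List Int), Dom_solution progresses speeds → Pre_solution progresses speeds → Spec_solution progresses speeds (solution progresses speeds)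

-- ===== LEMMAS AND PROOFS =====

-- the grouping B computes, as a function of the times list alone
def pvGroups : List Int → List Int
  | [] => []
  | t :: ts => altScan t 1 ts

lemma altScan_eq_crLoop (ts : List Int) : ∀ (c count : Int),
    altScan c count ts = (crLoop c count ts).1 :: pvGroups (crLoop c count ts).2 := by
  induction ts with
  | nil => intro c count; simp [altScan, crLoop, pvGroups]
  | cons t ts ih =>
    intro c count
    by_cases h : t ≤ c
    · have h' : ¬ t > c := by omega
      simp only [altScan, crLoop, if_pos h, if_neg h']
      exact ih c (count + 1)
    · have h' : t > c := by omega
      simp only [altScan, crLoop, if_neg h, if_pos h']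
      simp [pvGroups]

lemma solLoop_eq_groups : ∀ (n : Nat) (times : List Int), times.length ≤ n →
    ∀ (ans : List Int), solLoop ans times = ans ++ pvGroups times := by
  intro n
  induction n with
  | zero =>
    intro times h ans
    have : times = [] := List.eq_nil_of_length_eq_zero (Nat.le_zero.mp h)
    subst this; simp [solLoop, pvGroups]
  | succ n ih =>
    intro times h ans
    match times with
    | [] => simp [solLoop, pvGroups]
    | c :: rest =>
      rw [solLoop]
      have hlen : (count_release (c :: rest)).2.length ≤ n := by
        have := crLoop_snd_length_le c 1 rest
        simp only [count_release]
        simp at h; omega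
      rw [ih _ hlen]
      simp only [count_release, pvGroups]
      rw [altScan_eq_crLoop rest c 1]
      simp only [List.append_assoc, List.singleton_append]
      cases hx : (crLoop c 1 rest).2 <;> simp [pvGroups]

-- under Pre_, A's index-built times list equals B's zip-built one
lemma times_eq (progresses speeds : List Int) (hlen : speeds.length ≤ progresses.length) :
    (List.range speeds.length).map (fun (i : Nat) =>
      -(PySem.Int.floordiv (-(100 - PySem.List.pyGetD progresses ((i : Nat) : Int) 0)) (PySem.List.pyGetD speeds ((i : Nat) : Int) 0)))
    = (progresses.zip speeds).map (fun ps => -(PySem.Int.floordiv (ps.1 - 100) ps.2)) := by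
  apply List.ext_getElem
  · simp [Nat.min_eq_right hlen]
  · intro i h1 h2
    simp only [List.getElem_map, List.getElem_range, List.getElem_zip]

    have hi : i < speeds.length := by simpa using h1
    have hip : i < progresses.length := lt_of_lt_of_le hi hlen
    rw [PySem.List.pyGetD_natCast, PySem.List.pyGetD_natCast]
    rw [List.getD_eq_getElem _ _ hip, List.getD_eq_getElem _ _ hi]
    congr 1
    congr 1
    ring

-- ===== VERDICT (by name: the statement is the Claim_ definition above) =====
theorem solution_spec : Claim_equal_solution := by
  intro progresses speeds _hdom hpre
  unfold Spec_solution solution solution_alt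
  rw [times_eq progresses speeds hpre.1]
  rw [solLoop_eq_groups ((progresses.zip speeds).map _).length _ le_rfl]
  simp only [List.nil_append]
  match h : (progresses.zip speeds).map (fun ps => -(PySem.Int.floordiv (ps.1 - 100) ps.2)) with
  | [] => simp [pvGroups]
  | t :: ts => simp [pvGroups]
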